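-- pv_equiv track=rewrite | github.com/tmnewt/hacker-rank-python-work | Comps/HTI V/xorProblem.py | maxXorValue
-- ===== SOURCE A (Python) =====
-- def maxXorValue(x: str, k):
--     opp_max = ''
--     count = 0
--     i = 0
--     while (count < k) and (i < len(x)):
--         if x[i] == '0':
--             opp_max = opp_max + '1'
--             count += 1
--         else:
--             opp_max = opp_max + '0'
--         i += 1
--     return opp_max + '0'*(len(x)-i)
-- ===== SOURCE B (Python) =====
-- def maxXorValue(x: str, k):
--     parts = x.split('0')
--     z = len(parts) - 1
--     m = z if k >= z else (k if k > 0 else 0)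
--     head = ''.join('0' * len(p) + '1' for p in parts[:m])
--     return head + '0' * (len(x) - len(head))
-- ===== Notes on version B (the rewrite author's own statement) =====
-- stated objective: faster
-- what changed: Replaces A's per-character while-loop with repeated string concatenation by a run-based construction: split x on '0' into runs, compute m = clamp(k, 0, number-of-zeros) arithmetically, emit '0'*len(run)+'1' for the first m runs in one join, and pad the rest with a single '0'*tail.
import Mathlib
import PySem

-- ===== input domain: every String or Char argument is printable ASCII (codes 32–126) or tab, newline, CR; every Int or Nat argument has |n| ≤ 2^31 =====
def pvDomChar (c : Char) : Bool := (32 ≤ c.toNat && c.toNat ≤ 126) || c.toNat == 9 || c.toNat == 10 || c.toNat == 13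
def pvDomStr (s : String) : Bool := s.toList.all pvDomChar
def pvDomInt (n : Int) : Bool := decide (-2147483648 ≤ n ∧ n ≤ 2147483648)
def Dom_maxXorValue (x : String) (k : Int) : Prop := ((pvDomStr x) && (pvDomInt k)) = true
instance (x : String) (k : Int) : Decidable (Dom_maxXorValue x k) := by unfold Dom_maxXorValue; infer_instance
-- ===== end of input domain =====

-- B replaces A's per-character count-and-concatenate while-loop by a run-based construction:
-- split x on '0', flip the first clamp(k,0,#zeros) separators to '1' segment by segment, pad once.


-- ===== PORT A =====
-- A's while loop: consume characters left to right while count < k, building opp_max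
-- (a List Char accumulator; Python's str '+' is list append here), then pad with
-- '0' * (len(x) - i), i.e. one '0' per unconsumed character.
def pvLoopA (k : Int) : List Char → Int → List Char → List Char
  | [], _, acc => acc
  | ch :: rest, count, acc =>
    if count < k then
      if ch == '0' then pvLoopA k rest (count + 1) (acc ++ ['1'])
      else pvLoopA k rest count (acc ++ ['0'])
    else acc ++ List.replicate (ch :: rest).length '0'

def maxXorValue (x : String) (k : Int) : String :=
  String.mk (pvLoopA k x.toList 0 [])

-- ===== PORT B =====
-- Source B: parts = x.split('0') → PySem.Chars.splitOn (the separator "0" is nonempty, so Python's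
-- split never raises); m = z if k >= z else (k if k > 0 else 0); head = ''.join('0'*len(p)+'1'
-- for p in parts[:m]) ported as flatMap over take (m ≥ 0 always, so the slice is `take`);
-- tail pad '0' * (len(x) - len(head)) (the count is ≥ 0; Nat subtraction matches Python's clamp).
def maxXorValue_alt (x : String) (k : Int) : String :=
  let parts := PySem.Chars.splitOn x.toList ['0']
  let z : Int := (parts.length : Int) - 1
  let m : Int := if k ≥ z then z else if k > 0 then k else 0
  let head := (parts.take m.toNat).flatMap (fun p => List.replicate p.length '0' ++ ['1'])
  String.mk (head ++ List.replicate (x.toList.length - head.length) '0')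

-- ===== PRECONDITION & SPEC =====
def Spec_maxXorValue (x : String) (k : Int) (out : String) : Prop := out = maxXorValue_alt x k
instance (x : String) (k : Int) (out : String) : Decidable (Spec_maxXorValue x k out) := by unfold Spec_maxXorValue; infer_instance

-- ===== CLAIM (what is proved, stated in full; the proofs are below) =====
def Claim_equal_maxXorValue : Prop := ∀ (x : String) (k : Int), Dom_maxXorValue x k → Spec_maxXorValue x k (maxXorValue x k)

-- ===== LEMMAS AND PROOFS =====

-- Counter-form characterisation of A's loop output.
def pvF (k : Int) : List Char → Int → List Char
  | [], _ => []
  | ch :: rest, c =>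
    if c < k then
      if ch == '0' then '1' :: pvF k rest (c + 1) else '0' :: pvF k rest c
    else '0' :: pvF k rest c

theorem pvF_ge (k : Int) (xs : List Char) : ∀ c : Int, ¬ c < k →
    pvF k xs c = List.replicate xs.length '0' := by
  induction xs with
  | nil => intro c _; rfl
  | cons ch rest ih =>
    intro c h
    simp only [pvF, if_neg h, List.length_cons, List.replicate_succ]
    exact congrArg _ (ih c h)

theorem pvLoopA_eq (k : Int) (xs : List Char) : ∀ (c : Int) (acc : List Char),
    pvLoopA k xs c acc = acc ++ pvF k xs c := by
  induction xs with
  | nil => intro c acc; simp [pvLoopA, pvF]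
  | cons ch rest ih =>
    intro c acc
    by_cases h : c < k
    · by_cases hz : ch == '0'
      · simp [pvLoopA, pvF, h, hz, ih]
      · simp [pvLoopA, pvF, h, hz, ih]
    · simp [pvLoopA, pvF, h, pvF_ge k rest c h, List.replicate_succ]

-- Nat-budget form (k-c zeros still to flip).
def pvH : List Char → Nat → List Char
  | [], _ => []
  | ch :: rest, 0 => List.replicate (ch :: rest).length '0'
  | ch :: rest, n + 1 => if ch == '0' then '1' :: pvH rest n else '0' :: pvH rest (n + 1)

theorem pvF_eq_pvH (xs : List Char) : ∀ (k c : Int), pvF k xs c = pvH xs (k - c).toNat := by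
  induction xs with
  | nil => intro k c; rfl
  | cons ch rest ih =>
    intro k c
    by_cases h : c < k
    · obtain ⟨t, ht⟩ : ∃ t, (k - c).toNat = t + 1 := ⟨(k - c - 1).toNat, by omega⟩
      by_cases hz : ch == '0'
      · have : (k - (c + 1)).toNat = t := by omega
        simp [pvF, h, hz, ht, pvH, ih, this]
      · simp [pvF, h, hz, ht, pvH, ih, show (k - c).toNat = t + 1 from ht]
    · have h0 : (k - c).toNat = 0 := by omega
      rw [pvF_ge k (ch :: rest) c h, h0]
      rfl

-- Structural recursion equal to Python's split on the one-character separator '0'.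
def pvPrepend (c : Char) : List (List Char) → List (List Char)
  | [] => [[c]]
  | p :: ps => (c :: p) :: ps

def pvSplit0 : List Char → List (List Char)
  | [] => [[]]
  | c :: rest => if c == '0' then [] :: pvSplit0 rest else pvPrepend c (pvSplit0 rest)

theorem pvSplit0_ne_nil (xs : List Char) : pvSplit0 xs ≠ [] := by
  cases xs with
  | nil => simp [pvSplit0]
  | cons c rest =>
    by_cases h : c == '0'
    · simp [pvSplit0, h]
    · simp only [pvSplit0, if_neg h]
      cases pvSplit0 rest <;> simp [pvPrepend]

-- go-with-accumulators of PySem.Chars.splitOn, specialised to sep = ['0'].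
def pvCons (cur : List Char) : List (List Char) → List (List Char)
  | [] => [cur.reverse]
  | p :: ps => (cur.reverse ++ p) :: ps

theorem pvCons_prepend (cur : List Char) (c : Char) (parts : List (List Char)) :
    pvCons cur (pvPrepend c parts) = pvCons (c :: cur) parts := by
  cases parts <;> simp [pvCons, pvPrepend]

theorem splitOn_go_eq (fuel : Nat) : ∀ (l cur : List Char) (acc : List (List Char)),
    l.length < fuel →
    PySem.Chars.splitOn.go ['0'] fuel l cur acc = acc.reverse ++ pvCons cur (pvSplit0 l) := by
  induction fuel with
  | zero => intro l cur acc h; omega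
  | succ fuel ih =>
    intro l cur acc h
    cases l with
    | nil => simp [PySem.Chars.splitOn.go, pvSplit0, pvCons]
    | cons c rest =>
      by_cases hz : c = '0'
      · have hp : List.isPrefixOf ['0'] (c :: rest) = true := by
          subst hz; simp [List.isPrefixOf]
        rw [show PySem.Chars.splitOn.go ['0'] (fuel + 1) (c :: rest) cur acc
              = PySem.Chars.splitOn.go ['0'] fuel (List.drop (['0'] : List Char).length (c :: rest)) [] (cur.reverse :: acc) by
            simp [PySem.Chars.splitOn.go, hp]]
        rw [show List.drop (['0'] : List Char).length (c :: rest) = rest from rfl]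
        rw [ih rest [] (cur.reverse :: acc) (by simpa using Nat.lt_of_succ_lt_succ h)]
        have h2 : pvSplit0 (c :: rest) = [] :: pvSplit0 rest := by simp [pvSplit0, hz]
        obtain ⟨p, ps, hps⟩ : ∃ p ps, pvSplit0 rest = p :: ps := by
          cases hh : pvSplit0 rest with
          | nil => exact absurd hh (pvSplit0_ne_nil rest)
          | cons p ps => exact ⟨p, ps, rfl⟩
        simp [h2, hps, pvCons]
      · have hp : List.isPrefixOf ['0'] (c :: rest) = false := by
          simp [List.isPrefixOf, hz]
          intro hc; exact absurd hc.symm hz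
        rw [show PySem.Chars.splitOn.go ['0'] (fuel + 1) (c :: rest) cur acc
              = PySem.Chars.splitOn.go ['0'] fuel rest (c :: cur) acc by
            simp [PySem.Chars.splitOn.go, hp]]
        rw [ih rest (c :: cur) acc (Nat.lt_of_succ_lt_succ h)]
        have h2 : pvSplit0 (c :: rest) = pvPrepend c (pvSplit0 rest) := by
          simp [pvSplit0, hz]
        rw [h2, pvCons_prepend]

theorem splitOn_eq_pvSplit0 (xs : List Char) :
    PySem.Chars.splitOn xs ['0'] = pvSplit0 xs := by
  show PySem.Chars.splitOn.go ['0'] (xs.length + 1) xs [] [] = pvSplit0 xs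
  rw [splitOn_go_eq (xs.length + 1) xs [] [] (by omega)]
  obtain ⟨p, ps, hps⟩ : ∃ p ps, pvSplit0 xs = p :: ps := by
    cases hh : pvSplit0 xs with
    | nil => exact absurd hh (pvSplit0_ne_nil xs)
    | cons p ps => exact ⟨p, ps, rfl⟩
  simp [hps, pvCons]

theorem pvSplit0_length (xs : List Char) :
    (pvSplit0 xs).length = xs.count '0' + 1 := by
  induction xs with
  | nil => rfl
  | cons c rest ih =>
    by_cases hz : c == '0'
    · simp only [pvSplit0, if_pos hz, List.length_cons, ih]
      have : c = '0' := by simpa using hz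
      simp [this, List.count_cons]
    · simp only [pvSplit0, if_neg hz, List.count_cons]
      have hne : ¬ ((c == '0') = true) := hz
      cases hh : pvSplit0 rest with
      | nil => exact absurd hh (pvSplit0_ne_nil rest)
      | cons p ps =>
        simp only [pvPrepend, List.length_cons]
        rw [hh] at ih
        simp only [List.length_cons] at ih
        simp [ih, hz]

theorem pvH_no_zero (xs : List Char) (h : xs.count '0' = 0) :
    ∀ n, pvH xs n = List.replicate xs.length '0' := by
  induction xs with
  | nil => intro n; cases n <;> rfl
  | cons c rest ih =>
    intro n
    have hc : ¬ (c == '0') = true := by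
      intro hc
      rw [List.count_cons, if_pos hc] at h
      omega
    have hrest : rest.count '0' = 0 := by
      rw [List.count_cons, if_neg hc, Nat.add_zero] at h
      exact h
    cases n with
    | zero => rfl
    | succ n => simp [pvH, hc, ih hrest, List.replicate_succ]

-- The core of B as a function of the Nat budget.
def pvBuild (xs : List Char) (n : Nat) : List Char :=
  let head := ((pvSplit0 xs).take (min n (xs.count '0'))).flatMap
      (fun p => List.replicate p.length '0' ++ ['1'])
  head ++ List.replicate (xs.length - head.length) '0'

theorem pvBuild_eq_pvH (xs : List Char) : ∀ n, pvBuild xs n = pvH xs n := by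
  induction xs with
  | nil => intro n; simp [pvBuild, pvSplit0, pvH]
  | cons c rest ih =>
    intro n
    cases n with
    | zero =>
      simp only [pvBuild, Nat.zero_min, List.take_zero, List.flatMap_nil, List.nil_append,
        List.length_nil, Nat.sub_zero]
      rfl
    | succ n =>
      by_cases hz : c == '0'
      · have hc : c = '0' := by simpa using hz
        have hcount : (c :: rest).count '0' = rest.count '0' + 1 := by
          simp [List.count_cons, hc]
        have hmin : min (n + 1) ((c :: rest).count '0') = min n (rest.count '0') + 1 := by
          rw [hcount]; omega
        simp only [pvBuild, hmin, pvSplit0, if_pos hz, List.take_succ_cons, List.flatMap_cons,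
          List.length_nil, List.replicate_zero, List.nil_append, List.singleton_append,
          List.length_cons, List.cons_append, Nat.succ_sub_succ]
        rw [show (pvH (c :: rest) (n + 1)) = '1' :: pvH rest n by simp [pvH, hz]]
        have := ih n
        simpa [pvBuild] using congrArg (List.cons '1') this
      · have hcount : (c :: rest).count '0' = rest.count '0' := by
          simp [List.count_cons, hz]
        cases hc0 : rest.count '0' with
        | zero =>
          have : min (n + 1) ((c :: rest).count '0') = 0 := by rw [hcount, hc0]; simp
          simp only [pvBuild, this, List.take_zero, List.flatMap_nil, List.nil_append,
            List.length_nil, Nat.sub_zero]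
          rw [show pvH (c :: rest) (n + 1) = '0' :: pvH rest (n + 1) by simp [pvH, hz]]
          rw [pvH_no_zero rest hc0]
          simp [List.replicate_succ]
        | succ c' =>
          obtain ⟨p, ps, hps⟩ : ∃ p ps, pvSplit0 rest = p :: ps := by
            cases hh : pvSplit0 rest with
            | nil => exact absurd hh (pvSplit0_ne_nil rest)
            | cons p ps => exact ⟨p, ps, rfl⟩
          have hmin : min (n + 1) ((c :: rest).count '0') = min n c' + 1 := by
            rw [hcount, hc0]; omega
          have hmin' : min (n + 1) (rest.count '0') = min n c' + 1 := by
            rw [hc0]; omega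
          simp only [pvBuild, hmin, pvSplit0, if_neg hz, hps, pvPrepend, List.take_succ_cons,
            List.flatMap_cons, List.length_cons, List.replicate_succ, List.cons_append,
            Nat.succ_sub_succ]
          rw [show pvH (c :: rest) (n + 1) = '0' :: pvH rest (n + 1) by simp [pvH, hz]]
          have := ih (n + 1)
          simp only [pvBuild, hmin', hps, List.take_succ_cons, List.flatMap_cons] at this
          simpa using congrArg (List.cons '0') this

-- ===== VERDICT (by name: the statement is the Claim_ definition above) =====
theorem maxXorValue_spec : Claim_equal_maxXorValue := by
  intro x k _
  show maxXorValue x k = maxXorValue_alt x k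
  have hA : maxXorValue x k = String.mk (pvH x.toList k.toNat) := by
    unfold maxXorValue
    rw [pvLoopA_eq, List.nil_append, pvF_eq_pvH, Int.sub_zero]
  have hB : maxXorValue_alt x k = String.mk (pvBuild x.toList k.toNat) := by
    have hmm : (if k ≥ ((x.toList.count '0' + 1 : Nat) : Int) - 1
          then ((x.toList.count '0' + 1 : Nat) : Int) - 1
          else if k > 0 then k else 0).toNat = min k.toNat (x.toList.count '0') := by
      split_ifs <;> omega
    unfold maxXorValue_alt pvBuild
    simp only [splitOn_eq_pvSplit0, pvSplit0_length]
    rw [hmm]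
  rw [hA, hB, pvBuild_eq_pvH]
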